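-- pv_equiv track=rewrite | github.com/MayukhaI12/PYTHON_102_MAIN | Python102_Assignment4.py | available_vowels
-- ===== SOURCE A (Python) =====
-- def available_vowels(guess):
--   vowels_available = ["a","e","i","o","u"]
--   if guess in vowels_available:
--     vowels_available.pop(vowels_available.index(guess))
--   vowels_available_str = ""
--   for i  in vowels_available:
--     vowels_available_str  += i
--   return vowels_available_str
-- ===== SOURCE B (Python) =====
-- def available_vowels(guess):
--   return "".join(c for c in "aeiou" if c != guess)
-- ===== Notes on version B (the rewrite author's own statement) =====
-- stated objective: simpler
-- what changed: Replaces the membership-check + index + pop mutation of a list plus a separate concatenation loop with a single filtering pass over the literal vowel string.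
import Mathlib
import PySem

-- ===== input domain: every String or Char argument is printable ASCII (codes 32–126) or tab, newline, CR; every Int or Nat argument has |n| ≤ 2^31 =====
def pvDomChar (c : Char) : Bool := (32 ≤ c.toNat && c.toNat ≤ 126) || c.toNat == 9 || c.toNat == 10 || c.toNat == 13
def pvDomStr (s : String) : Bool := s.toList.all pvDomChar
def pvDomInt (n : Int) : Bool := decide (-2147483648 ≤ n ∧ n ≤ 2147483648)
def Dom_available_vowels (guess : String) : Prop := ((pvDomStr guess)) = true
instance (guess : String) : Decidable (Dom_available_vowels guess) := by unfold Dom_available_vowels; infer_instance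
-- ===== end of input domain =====

-- ===== PORT A =====
-- B replaces A's check-index-pop list mutation and separate concatenation loop with one filter pass; simpler.
def available_vowels (guess : String) : String :=
  let va0 : List String := ["a","e","i","o","u"]
  let va : List String :=
    if va0.contains guess then
      match PySem.List.index? va0 guess with
      | some i =>
        match PySem.List.pop? va0 (Int.ofNat i) with
        | some r => r.2
        | none => va0
      | none => va0
    else va0
  va.foldl (fun acc s => acc ++ s) ""

-- ===== PORT B =====
def available_vowels_alt (guess : String) : String :=
  String.ofList (("aeiou".toList).filter (fun c => String.ofList [c] != guess))

-- ===== PRECONDITION & SPEC =====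
def Spec_available_vowels (guess : String) (out : String) : Prop := out = available_vowels_alt guess
instance (guess : String) (out : String) : Decidable (Spec_available_vowels guess out) := by unfold Spec_available_vowels; infer_instance

-- ===== CLAIM (what is proved, stated in full; the proofs are below) =====
def Claim_equal_available_vowels : Prop := ∀ (guess : String), Dom_available_vowels guess → Spec_available_vowels guess (available_vowels guess)

-- ===== LEMMAS AND PROOFS =====

-- ===== VERDICT (by name: the statement is the Claim_ definition above) =====
theorem available_vowels_spec : Claim_equal_available_vowels := by
  intro guess _
  unfold Spec_available_vowels
  by_cases h1 : guess = "a"; · subst h1; decide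
  by_cases h2 : guess = "e"; · subst h2; decide
  by_cases h3 : guess = "i"; · subst h3; decide
  by_cases h4 : guess = "o"; · subst h4; decide
  by_cases h5 : guess = "u"; · subst h5; decide
  have hc : (["a", "e", "i", "o", "u"] : List String).contains guess = false := by
    simp
    exact ⟨h1, h2, h3, h4, h5⟩
  have hA : available_vowels guess = "aeiou" := by
    unfold available_vowels
    simp only [hc, Bool.false_eq_true, if_false]
    rfl
  have hB : available_vowels_alt guess = "aeiou" := by
    unfold available_vowels_alt
    have e1 : (String.ofList ['a'] != guess) = true := by
      rw [bne_iff_ne]; show ("a" : String) ≠ guess; exact Ne.symm h1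
    have e2 : (String.ofList ['e'] != guess) = true := by
      rw [bne_iff_ne]; show ("e" : String) ≠ guess; exact Ne.symm h2
    have e3 : (String.ofList ['i'] != guess) = true := by
      rw [bne_iff_ne]; show ("i" : String) ≠ guess; exact Ne.symm h3
    have e4 : (String.ofList ['o'] != guess) = true := by
      rw [bne_iff_ne]; show ("o" : String) ≠ guess; exact Ne.symm h4
    have e5 : (String.ofList ['u'] != guess) = true := by
      rw [bne_iff_ne]; show ("u" : String) ≠ guess; exact Ne.symm h5
    rw [show ("aeiou".toList) = ['a', 'e', 'i', 'o', 'u'] from rfl]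
    simp only [List.filter_cons, List.filter_nil, e1, e2, e3, e4, e5, if_true]
  rw [hA, hB]
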